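-- pv_equiv track=rewrite | github.com/KyoungSoo1996/python-coding-practice | python project/This is Coding Test/stringReSort.py | ReSort
-- ===== SOURCE A (Python) =====
-- isnum = ['1','2','3','4','5','6','7','8','9','0']
--
-- def ReSort(text):
--     countNum = 0
--     sumNum = 0
--     for i in text:
--         if i in isnum:
--             countNum += 1
--             sumNum += int(i)
--
--     result = sorted(text)[countNum:]
--     return ''.join(result) + str(sumNum)
-- ===== SOURCE B (Python) =====
-- def ReSort(text):
--     countNum = 0
--     sumNum = 0
--     freq = {}
--     for c in text:
--         if c.isdigit():
--             countNum += 1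
--             sumNum += int(c)
--         freq[c] = freq.get(c, 0) + 1
--     remaining = countNum
--     parts = []
--     for k in sorted(freq):
--         cnt = freq[k]
--         dropped = min(remaining, cnt)
--         remaining -= dropped
--         parts.append(k * (cnt - dropped))
--     return ''.join(parts) + str(sumNum)
-- ===== Notes on version B (the rewrite author's own statement) =====
-- stated objective: faster
-- what changed: Replaces A's full comparison sort plus list slice with a single pass that builds a character frequency table (and the digit count/sum), then a counting-sort-style expansion over the sorted distinct keys with a remaining-drop counter.
import Mathlib
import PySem

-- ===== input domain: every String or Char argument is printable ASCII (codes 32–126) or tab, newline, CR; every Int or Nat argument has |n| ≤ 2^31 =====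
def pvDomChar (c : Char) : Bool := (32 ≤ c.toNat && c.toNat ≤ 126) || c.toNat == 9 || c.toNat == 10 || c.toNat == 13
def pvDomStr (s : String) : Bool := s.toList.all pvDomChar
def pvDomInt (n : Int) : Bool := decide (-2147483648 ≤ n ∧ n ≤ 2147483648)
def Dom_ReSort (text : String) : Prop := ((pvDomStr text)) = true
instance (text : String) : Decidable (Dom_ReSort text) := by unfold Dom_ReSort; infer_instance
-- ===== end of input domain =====

-- B replaces A's comparison sort + slice by a one-pass frequency table and a
-- counting-sort-style expansion over the sorted distinct keys (objective: faster — only the ≤ 128 distinct keys are sorted, not all n characters).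

-- ===== PORT A =====
def isnumChars : List Char := ['1','2','3','4','5','6','7','8','9','0']

def ReSort (text : String) : String :=
  let st := text.toList.foldl
    (fun (acc : Int × Int) i =>
      if i ∈ isnumChars then
        -- int(i) on a digit character is exactly its code minus 48
        (acc.1 + 1, acc.2 + ((i.toNat : Int) - 48))
      else acc)
    (0, 0)
  let result := PySem.List.slice (PySem.List.sorted text.toList (fun x => x) false) (some st.1) none
  String.ofList result ++ PySem.Int.toStr st.2

-- ===== PORT B =====
def ReSort_alt (text : String) : String :=
  let st := text.toList.foldl
    (fun (acc : Int × Int × PySem.Dict Char Int) c =>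
      -- c.isdigit() on one ASCII character is exactly '0' ≤ c ≤ '9'; int(c) = code - 48
      let acc' : Int × Int :=
        if '0' ≤ c ∧ c ≤ '9' then (acc.1 + 1, acc.2.1 + ((c.toNat : Int) - 48))
        else (acc.1, acc.2.1)
      (acc'.1, acc'.2, acc.2.2.insert c (acc.2.2.getD c 0 + 1)))
    (0, 0, PySem.Dict.empty)
  let freq := st.2.2
  let fin := (PySem.List.sorted freq.keys (fun x => x) false).foldl
    (fun (acc : Int × List Char) k =>
      let cnt := freq.getD k 0
      let dropped := min acc.1 cnt
      (acc.1 - dropped, acc.2 ++ PySem.List.pyRepeat [k] (cnt - dropped)))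
    (st.1, [])
  String.ofList fin.2 ++ PySem.Int.toStr st.2.1

-- ===== PRECONDITION & SPEC =====
def Spec_ReSort (text : String) (out : String) : Prop := out = ReSort_alt text
instance (text : String) (out : String) : Decidable (Spec_ReSort text out) := by unfold Spec_ReSort; infer_instance

-- ===== CLAIM (what is proved, stated in full; the proofs are below) =====
def Claim_equal_ReSort : Prop := ∀ (text : String), Dom_ReSort text → Spec_ReSort text (ReSort text)

-- ===== LEMMAS AND PROOFS =====

-- A's membership test in the digit list is B's range test
theorem digit_cond (c : Char) : (c ∈ isnumChars) ↔ ('0' ≤ c ∧ c ≤ '9') := by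
  simp [isnumChars, Char.le_def, Char.ext_iff]
  constructor
  · rintro (h|h|h|h|h|h|h|h|h|h) <;> simp [h]
  · rintro ⟨h1, h2⟩
    have h1' := UInt32.le_iff_toNat_le.mp h1
    have h2' := UInt32.le_iff_toNat_le.mp h2
    have e48 : (48:UInt32).toNat = 48 := rfl
    have e49 : (49:UInt32).toNat = 49 := rfl
    have e50 : (50:UInt32).toNat = 50 := rfl
    have e51 : (51:UInt32).toNat = 51 := rfl
    have e52 : (52:UInt32).toNat = 52 := rfl
    have e53 : (53:UInt32).toNat = 53 := rfl
    have e54 : (54:UInt32).toNat = 54 := rfl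
    have e55 : (55:UInt32).toNat = 55 := rfl
    have e56 : (56:UInt32).toNat = 56 := rfl
    have e57 : (57:UInt32).toNat = 57 := rfl
    simp only [← UInt32.toNat_inj, e48, e49, e50, e51, e52, e53, e54, e55, e56, e57]
    omega

-- B's single combined fold splits into A's count/sum fold and the frequency-dict fold
theorem fold_split (cs : List Char) (a b : Int) (d : PySem.Dict Char Int) :
    cs.foldl
      (fun (acc : Int × Int × PySem.Dict Char Int) c =>
        let acc' : Int × Int :=
          if '0' ≤ c ∧ c ≤ '9' then (acc.1 + 1, acc.2.1 + ((c.toNat : Int) - 48))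
          else (acc.1, acc.2.1)
        (acc'.1, acc'.2, acc.2.2.insert c (acc.2.2.getD c 0 + 1)))
      (a, b, d)
    = ((cs.foldl (fun (acc : Int × Int) i =>
          if i ∈ isnumChars then (acc.1 + 1, acc.2 + ((i.toNat : Int) - 48)) else acc) (a, b)).1,
       (cs.foldl (fun (acc : Int × Int) i =>
          if i ∈ isnumChars then (acc.1 + 1, acc.2 + ((i.toNat : Int) - 48)) else acc) (a, b)).2,
       cs.foldl (fun d c => d.insert c (d.getD c 0 + 1)) d) := by
  induction cs generalizing a b d with
  | nil => simp
  | cons c cs ih =>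
    simp only [List.foldl_cons]
    by_cases h : '0' ≤ c ∧ c ≤ '9'
    · rw [if_pos h, if_pos ((digit_cond c).mpr h)]
      exact ih _ _ _
    · rw [if_neg h, if_neg (fun hm => h ((digit_cond c).mp hm))]
      exact ih _ _ _

-- the digit count never goes negative
theorem fold_fst_nonneg (cs : List Char) (a b : Int) (ha : 0 ≤ a) :
    0 ≤ (cs.foldl (fun (acc : Int × Int) i =>
          if i ∈ isnumChars then (acc.1 + 1, acc.2 + ((i.toNat : Int) - 48)) else acc) (a, b)).1 := by
  induction cs generalizing a b with
  | nil => simpa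
  | cons c cs ih =>
    simp only [List.foldl_cons]
    split_ifs
    · exact ih _ _ (by omega)
    · exact ih _ _ ha

-- B's remaining-drop loop drops `rem` elements across the concatenated groups
theorem drop_across (ks : List Char) (n : Char → Int) (hn : ∀ k, 0 ≤ n k)
    (rem : Int) (hrem : 0 ≤ rem) (out : List Char) :
    (ks.foldl
      (fun (acc : Int × List Char) k =>
        let cnt := n k
        let dropped := min acc.1 cnt
        (acc.1 - dropped, acc.2 ++ PySem.List.pyRepeat [k] (cnt - dropped)))
      (rem, out)).2
    = out ++ (ks.flatMap (fun k => List.replicate (n k).toNat k)).drop rem.toNat := by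
  induction ks generalizing rem out with
  | nil => simp
  | cons k ks ih =>
    simp only [List.foldl_cons, List.flatMap_cons]
    rw [ih _ (by have := hn k; omega) _]
    rw [List.drop_append, List.drop_replicate]
    rw [PySem.List.pyRepeat_singleton]
    have h1 : (n k - min rem (n k)).toNat = (n k).toNat - rem.toNat := by
      have := hn k; omega
    have h2 : (rem - min rem (n k)).toNat = rem.toNat - (List.replicate (n k).toNat k).length := by
      simp only [List.length_replicate]; have := hn k; omega
    rw [h1, h2, List.append_assoc]

theorem count_flatMap_replicate (ks : List Char) (hnd : ks.Nodup) (n : Char → Nat) (x : Char) :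
    (ks.flatMap (fun k => List.replicate (n k) k)).count x = if x ∈ ks then n x else 0 := by
  induction ks with
  | nil => simp
  | cons k ks ih =>
    simp only [List.flatMap_cons, List.count_append, List.count_replicate,
      List.mem_cons, ih hnd.of_cons]
    rcases List.nodup_cons.mp hnd with ⟨hk, _⟩
    by_cases hx : x = k
    · subst hx; simp [hk]
    · have hkx : (k == x) = false := by
        simp only [beq_eq_false_iff_ne, ne_eq]
        exact fun h => hx h.symm
      by_cases hm : x ∈ ks <;> simp [hkx, hm, hx]

-- the counting-sort expansion is a permutation of cs …
theorem groups_perm (cs : List Char) :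
    ((PySem.List.sorted (PySem.Set.ofList cs) (fun x => x) false).flatMap
      (fun k => List.replicate (cs.count k) k)).Perm cs := by
  rw [List.perm_iff_count]
  intro x
  have hnd : (PySem.List.sorted (PySem.Set.ofList cs) (fun x => x) false).Nodup :=
    (PySem.List.sorted_perm _ _ _).nodup_iff.mpr (PySem.Set.nodup_ofList cs)
  rw [count_flatMap_replicate _ hnd]
  by_cases hx : x ∈ cs
  · simp [PySem.List.mem_sorted, PySem.Set.mem_ofList, hx]
  · simp [PySem.List.mem_sorted, PySem.Set.mem_ofList, hx, List.count_eq_zero_of_not_mem hx]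

theorem pairwise_flatMap_replicate (ks : List Char) (hp : ks.Pairwise (· < ·)) (n : Char → Nat) :
    (ks.flatMap (fun k => List.replicate (n k) k)).Pairwise (· ≤ ·) := by
  induction ks with
  | nil => simp
  | cons k ks ih =>
    rcases List.pairwise_cons.mp hp with ⟨hlt, htl⟩
    simp only [List.flatMap_cons]
    rw [List.pairwise_append]
    refine ⟨List.pairwise_replicate.mpr (Or.inr le_rfl), ih htl, ?_⟩
    intro a ha b hb
    rcases List.eq_of_mem_replicate ha with rfl
    rcases List.mem_flatMap.mp hb with ⟨k', hk', hb'⟩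
    rcases List.eq_of_mem_replicate hb' with rfl
    exact (hlt _ hk').le

-- … and it is nondecreasing …
theorem groups_pairwise (cs : List Char) :
    ((PySem.List.sorted (PySem.Set.ofList cs) (fun x => x) false).flatMap
      (fun k => List.replicate (cs.count k) k)).Pairwise (· ≤ ·) := by
  exact pairwise_flatMap_replicate _ (PySem.List.sorted_ofList_pairwise_lt cs) _

-- … so it IS sorted(cs)
theorem groups_eq_sorted (cs : List Char) :
    PySem.List.sorted cs (fun x => x) false
    = (PySem.List.sorted (PySem.Set.ofList cs) (fun x => x) false).flatMap
        (fun k => List.replicate (cs.count k) k) := by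
  exact PySem.List.sorted_id_eq_of_perm_of_pairwise _ _ (groups_perm cs) (groups_pairwise cs)

-- ===== VERDICT (by name: the statement is the Claim_ definition above) =====
theorem ReSort_spec : Claim_equal_ReSort := by
  intro text _
  unfold Spec_ReSort
  show ReSort text = ReSort_alt text
  rw [ReSort, ReSort_alt]
  simp only [fold_split, PySem.Dict.foldl_insert_getD_add_one_eq_counter,
    PySem.Dict.keys_counter, PySem.Dict.getD_counter]
  rw [drop_across _ _ (fun k => Int.natCast_nonneg _) _
        (fold_fst_nonneg text.toList 0 0 le_rfl) _]
  rw [PySem.List.slice_from _ (fold_fst_nonneg text.toList 0 0 le_rfl)]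
  simp only [Int.toNat_natCast, List.nil_append]
  rw [← groups_eq_sorted]
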